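-- pv_equiv track=rewrite | github.com/alexandraback/datacollection | solutions_5631989306621952_1/Python/Nin0/a.py | solve
-- ===== SOURCE A (Python) =====
-- def solve(niz):
--     if niz == '':
--         return ''
--     m, p = niz[0], 0
--     for i in range(1, len(niz)):
--         if niz[i] > m:
--             m, p = niz[i], i
--     s2 = solve(niz[:p])
--     for c in niz[p:]:
--         if c == m:
--             s2 = c + s2
--         else:
--             s2 += c
--     return s2
-- ===== SOURCE B (Python) =====
-- def solve(niz):
--     pre = []
--     suf = []
--     cur = None
--     for c in niz:
--         if cur is None or c > cur:
--             cur = c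
--         if c == cur:
--             pre.append(c)
--         else:
--             suf.append(c)
--     pre.reverse()
--     return ''.join(pre) + ''.join(suf)
-- ===== Notes on version B (the rewrite author's own statement) =====
-- stated objective: faster
-- what changed: Replaces the O(n^2) recursion on prefixes with a single left-to-right pass that keeps the running maximum and classifies each character as a prepend (equals the running max, i.e. it is the leader of its segment) or an append, then emits reversed-prepends ++ appends.
import Mathlib
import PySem

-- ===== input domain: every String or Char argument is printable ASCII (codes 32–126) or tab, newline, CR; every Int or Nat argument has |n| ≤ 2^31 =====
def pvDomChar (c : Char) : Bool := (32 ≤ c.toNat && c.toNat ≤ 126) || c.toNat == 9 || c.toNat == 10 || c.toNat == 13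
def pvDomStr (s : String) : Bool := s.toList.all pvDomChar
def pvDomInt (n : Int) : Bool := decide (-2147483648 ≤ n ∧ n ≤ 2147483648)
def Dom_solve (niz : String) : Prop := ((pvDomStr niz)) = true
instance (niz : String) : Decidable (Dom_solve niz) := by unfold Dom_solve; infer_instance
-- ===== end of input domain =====

-- B replaces A's O(n^2) recursion on prefixes with one linear pass over the string
-- (running maximum classifies each char as prepend/append); same return value, proved below.

-- ===== PORT A =====

-- A's for-loop computing (m, p) = (max char, first index attaining it): fold over the
-- indexed tail, exactly A's `if niz[i] > m: m, p = niz[i], i`.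
def solveLoopA (l : List Char) : Char × Nat :=
  match l with
  | [] => (' ', 0)   -- unreachable: A returns early on the empty string
  | c :: rest =>
    (rest.zipIdx 1).foldl (fun mp ci => if ci.1 > mp.1 then (ci.1, ci.2) else mp) (c, 0)

-- Invariant of A's max-loop, stated over the already-scanned prefix u (needed for
-- termination of the recursion below, hence placed above the port).
theorem solveLoopA_inv (rest : List Char) : ∀ (u : List Char) (m : Char) (p : Nat),
    p < u.length → (∀ x ∈ u.take p, x < m) → u[p]? = some m → (∀ x ∈ u, x ≤ m) →
    let r := (rest.zipIdx u.length).foldl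
      (fun mp ci => if ci.1 > mp.1 then (ci.1, ci.2) else mp) (m, p)
    r.2 < (u ++ rest).length ∧ (∀ x ∈ (u ++ rest).take r.2, x < r.1) ∧
      (u ++ rest)[r.2]? = some r.1 ∧ (∀ x ∈ u ++ rest, x ≤ r.1) := by
  induction rest with
  | nil =>
    intro u m p h1 h2 h3 h4
    simpa using ⟨h1, h2, h3, h4⟩
  | cons c rest ih =>
    intro u m p h1 h2 h3 h4
    have hz : ((c :: rest).zipIdx u.length) = (c, u.length) :: rest.zipIdx (u.length + 1) := by
      simp [List.zipIdx]
    rw [hz, List.foldl_cons]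
    by_cases hc : c > m
    · simp only [hc, if_pos]
      have h1' : u.length < (u ++ [c]).length := by simp
      have h2' : ∀ x ∈ (u ++ [c]).take u.length, x < c := by
        intro x hx
        rw [List.take_left] at hx
        exact lt_of_le_of_lt (h4 x hx) hc
      have h3' : (u ++ [c])[u.length]? = some c := by
        simp
      have h4' : ∀ x ∈ u ++ [c], x ≤ c := by
        intro x hx
        rcases List.mem_append.1 hx with h | h
        · exact le_of_lt (lt_of_le_of_lt (h4 x h) hc)
        · simp at h; simp [h]
      have := ih (u ++ [c]) c u.length (by simpa using h1') (by simpa using h2')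
        (by simpa using h3') h4'
      simpa [List.append_assoc] using this
    · simp only [hc, if_neg, if_false]
      have h1' : p < (u ++ [c]).length := by simp; omega
      have h2' : ∀ x ∈ (u ++ [c]).take p, x < m := by
        intro x hx
        rw [List.take_append_of_le_length (by omega)] at hx
        exact h2 x hx
      have h3' : (u ++ [c])[p]? = some m := by
        rw [List.getElem?_append_left h1]; exact h3
      have h4' : ∀ x ∈ u ++ [c], x ≤ m := by
        intro x hx
        rcases List.mem_append.1 hx with h | h
        · exact h4 x h
        · simp at h; subst h; exact le_of_not_gt hc
      have := ih (u ++ [c]) m p h1' h2' h3' h4'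
      simpa [List.append_assoc] using this

theorem solveLoopA_facts (l : List Char) (hl : l ≠ []) :
    (solveLoopA l).2 < l.length ∧ (∀ x ∈ l.take (solveLoopA l).2, x < (solveLoopA l).1) ∧
      l[(solveLoopA l).2]? = some (solveLoopA l).1 ∧ (∀ x ∈ l, x ≤ (solveLoopA l).1) := by
  match l, hl with
  | c :: rest, _ =>
    have h := solveLoopA_inv rest [c] c 0 (by simp) (by simp) (by simp) (by simp)
    simpa [solveLoopA] using h

theorem solveLoopA_lt (l : List Char) (hl : l ≠ []) : (solveLoopA l).2 < l.length :=
  (solveLoopA_facts l hl).1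

-- A itself: recursion on the prefix before the first maximum, then the prepend/append loop.
def solveL (l : List Char) : List Char :=
  if hl : l = [] then []
  else
    let mp := solveLoopA l
    let s2 := solveL (l.take mp.2)
    (l.drop mp.2).foldl (fun s c => if c == mp.1 then c :: s else s ++ [c]) s2
termination_by l.length
decreasing_by
  simpa [List.length_take] using solveLoopA_lt l hl

def solve (niz : String) : String := String.mk (solveL niz.toList)

-- ===== PORT B =====

-- B's single pass: state (cur running max, pre list, suf list); at the end pre is
-- reversed and the two parts are concatenated, exactly as Source B does.
def solve_alt (niz : String) : String :=
  let st := niz.toList.foldl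
    (fun (st : Option Char × List Char × List Char) c =>
      let cur : Char := match st.1 with
        | none => c
        | some m => if c > m then c else m
      if c == cur then (some cur, st.2.1 ++ [c], st.2.2)
      else (some cur, st.2.1, st.2.2 ++ [c]))
    (none, [], [])
  String.mk (st.2.1.reverse ++ st.2.2)

-- ===== PRECONDITION & SPEC =====
def Spec_solve (niz : String) (out : String) : Prop := out = solve_alt niz
instance (niz : String) (out : String) : Decidable (Spec_solve niz out) := by unfold Spec_solve; infer_instance

-- ===== CLAIM (what is proved, stated in full; the proofs are below) =====
def Claim_equal_solve : Prop := ∀ (niz : String), Dom_solve niz → Spec_solve niz (solve niz)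

-- ===== LEMMAS AND PROOFS =====

-- Recursive reformulation of B's fold: classify each char against the running max.
def classifyB (cur : Option Char) : List Char → List Char × List Char
  | [] => ([], [])
  | c :: rest =>
    let cur' : Char := match cur with
      | none => c
      | some m => if c > m then c else m
    let pr := classifyB (some cur') rest
    if c == cur' then (c :: pr.1, pr.2) else (pr.1, c :: pr.2)

def runMaxB (cur : Option Char) : List Char → Option Char
  | [] => cur
  | c :: rest => runMaxB (some (match cur with | none => c | some m => if c > m then c else m)) rest

theorem foldB_eq_classifyB (l : List Char) : ∀ (cur : Option Char) (pre suf : List Char),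
    l.foldl (fun (st : Option Char × List Char × List Char) c =>
      let cur : Char := match st.1 with
        | none => c
        | some m => if c > m then c else m
      if c == cur then (some cur, st.2.1 ++ [c], st.2.2)
      else (some cur, st.2.1, st.2.2 ++ [c])) (cur, pre, suf)
    = (runMaxB cur l, pre ++ (classifyB cur l).1, suf ++ (classifyB cur l).2) := by
  induction l with
  | nil => intro cur pre suf; simp [classifyB, runMaxB]
  | cons c rest ih =>
    intro cur pre suf
    simp only [List.foldl_cons, classifyB, runMaxB]
    by_cases hc : c == (match cur with | none => c | some m => if c > m then c else m)
    · simp only [hc, if_pos]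
      rw [ih]
      simp [hc, List.append_assoc]
    · simp only [hc, if_neg, if_false]
      rw [ih]
      simp [hc, List.append_assoc]

-- cur is either absent or strictly below m
def CurLt (cur : Option Char) (m : Char) : Prop := ∀ b, cur = some b → b < m

theorem runMaxB_lt (t : List Char) (m : Char) : ∀ cur, CurLt cur m → (∀ x ∈ t, x < m) →
    CurLt (runMaxB cur t) m := by
  induction t with
  | nil => intro cur h _; exact h
  | cons c rest ih =>
    intro cur h hall
    refine ih _ ?_ (fun x hx => hall x (List.mem_cons_of_mem _ hx))
    intro b hb
    cases cur with
    | none => simp at hb; subst hb; exact hall c (by simp)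
    | some a =>
      simp at hb
      by_cases hca : c > a
      · simp [hca] at hb; subst hb; exact hall c (by simp)
      · simp [hca] at hb; subst hb; exact h a rfl

-- classifyB splits over append, with the running max threaded through.
theorem classifyB_append (t : List Char) : ∀ (d : List Char) (cur : Option Char),
    classifyB cur (t ++ d)
      = ((classifyB cur t).1 ++ (classifyB (runMaxB cur t) d).1,
         (classifyB cur t).2 ++ (classifyB (runMaxB cur t) d).2) := by
  induction t with
  | nil => intro d cur; simp [classifyB, runMaxB]
  | cons c rest ih =>
    intro d cur
    simp only [List.cons_append, classifyB, runMaxB]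
    rw [ih]
    by_cases hc : c == (match cur with | none => c | some m => if c > m then c else m)
    · simp [hc]
    · simp [hc]

-- once the running max is m and no later char exceeds it, classifyB is a filter
theorem classifyB_le (m : Char) (d : List Char) (hd : ∀ x ∈ d, x ≤ m) :
    classifyB (some m) d = (d.filter (· == m), d.filter (fun c => ¬ (c == m))) := by
  induction d with
  | nil => simp [classifyB]
  | cons c rest ih =>
    have hc : ¬ c > m := not_lt_of_ge (hd c (by simp))
    have hrest := ih (fun x hx => hd x (List.mem_cons_of_mem _ hx))
    simp only [classifyB, hc, if_false, if_neg hc]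
    rw [hrest]
    by_cases he : c = m
    · simp [he, List.filter_cons]
    · simp [he, List.filter_cons]

-- the segment starting at the first maximum m: classifyB puts the m's in pre, rest in suf
theorem classifyB_seg (m : Char) (d' : List Char) (cur : Option Char) (hcur : CurLt cur m)
    (hd : ∀ x ∈ d', x ≤ m) :
    classifyB cur (m :: d')
      = ((m :: d').filter (· == m), (m :: d').filter (fun c => ¬ (c == m))) := by
  cases cur with
  | none =>
    simp only [classifyB]
    rw [classifyB_le m d' hd]
    simp [List.filter_cons]
  | some b =>
    have hb : m > b := hcur b rfl
    simp only [classifyB, hb, if_pos]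
    rw [classifyB_le m d' hd]
    simp [List.filter_cons]

-- A's inner prepend/append loop in closed form
theorem foldA_closed (m : Char) (d : List Char) : ∀ (s0 : List Char),
    d.foldl (fun s c => if c == m then c :: s else s ++ [c]) s0
      = (d.filter (· == m)).reverse ++ s0 ++ d.filter (fun c => ¬ (c == m)) := by
  induction d with
  | nil => intro s0; simp
  | cons c rest ih =>
    intro s0
    simp only [List.foldl_cons]
    by_cases he : c = m
    · simp only [show (c == m) = true by simp [he], if_pos]
      rw [ih]
      simp [List.filter_cons, he, List.append_assoc]
    · simp only [show (c == m) = false by simp [he], if_false]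
      rw [ih]
      simp [List.filter_cons, he, List.append_assoc]

-- Main invariant: A's recursion computes exactly reversed-prepends ++ appends.
theorem solveL_eq_classifyB (l : List Char) :
    solveL l = (classifyB none l).1.reverse ++ (classifyB none l).2 := by
  induction hn : l.length using Nat.strong_induction_on generalizing l with
  | _ n ih =>
  by_cases hl : l = []
  · subst hl; simp [solveL, classifyB]
  · obtain ⟨hp, htake, hget, hall⟩ := solveLoopA_facts l hl
    set m := (solveLoopA l).1 with hm
    set p := (solveLoopA l).2 with hpdef
    -- the string splits as take p ++ (m :: rest of drop p)
    have hdrop : l.drop p = m :: (l.drop (p + 1)) := by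
      have := List.getElem?_eq_some_iff.1 hget
      obtain ⟨hlt, hv⟩ := this
      rw [List.drop_eq_getElem_cons hlt, hv]
    have hsplit : l = l.take p ++ l.drop p := (List.take_append_drop p l).symm
    -- IH on the prefix
    have htlen : (l.take p).length < n := by
      subst hn; simp [List.length_take]; omega
    have hIH : solveL (l.take p) = (classifyB none (l.take p)).1.reverse ++ (classifyB none (l.take p)).2 :=
      ih _ htlen _ rfl
    -- unfold solveL once
    rw [solveL]
    simp only [hl, dif_neg, not_false_iff]
    rw [← hm, ← hpdef, hIH, hdrop, foldA_closed]
    -- now compute classifyB on the whole list via the split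
    have hcur : CurLt (runMaxB none (l.take p)) m :=
      runMaxB_lt _ _ none (fun b hb => by simp at hb) htake
    have hdle : ∀ x ∈ l.drop (p + 1), x ≤ m := fun x hx => hall x (List.mem_of_mem_drop hx)
    have hseg := classifyB_seg m (l.drop (p + 1)) (runMaxB none (l.take p)) hcur hdle
    conv_rhs => rw [hsplit, classifyB_append, hdrop, hseg]
    simp [List.reverse_append, List.append_assoc]

theorem solve_alt_eq (niz : String) :
    solve_alt niz = String.mk ((classifyB none niz.toList).1.reverse ++ (classifyB none niz.toList).2) := by
  unfold solve_alt
  rw [foldB_eq_classifyB]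
  simp

-- ===== VERDICT (by name: the statement is the Claim_ definition above) =====
theorem solve_spec : Claim_equal_solve := by
  intro niz _
  unfold Spec_solve
  rw [solve_alt_eq, solve, solveL_eq_classifyB]
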